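-- pv_equiv track=rewrite | github.com/black-yt/RCB | data/runs/Material_003_20260402_225655/workspace/code/run_analysis.py | smiles_stats
-- ===== SOURCE A (Python) =====
-- from typing import Dict, List, Tuple
--
-- COMMON_ATOMS = ["C", "N", "O", "S", "P", "F", "Cl", "Br", "I", "Si"]
--
-- def smiles_stats(smiles: str) -> Dict[str, float]:
--     s = str(smiles)
--     stats = {
--         "length": len(s),
--         "ring_digits": sum(ch.isdigit() for ch in s),
--         "branches": s.count("(") + s.count(")"),
--         "double_bonds": s.count("="),
--         "triple_bonds": s.count("#"),
--         "aromatic_lower": sum(ch in "cnosp" for ch in s),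
--         "halogens": s.count("Cl") + s.count("Br") + s.count("F") + s.count("I"),
--         "hetero_total": 0,
--     }
--     hetero = 0
--     for atom in COMMON_ATOMS:
--         count = s.count(atom)
--         stats[f"atom_{atom}"] = count
--         if atom != "C":
--             hetero += count
--     stats["hetero_total"] = hetero
--     return stats
-- ===== SOURCE B (Python) =====
-- def smiles_stats(smiles):
--     # Single left-to-right pass with one-character look-behind, instead of
--     # ~15 separate scans of the string.
--     s = str(smiles)
--     length = digits = paren = dbl = tpl = aro = 0
--     cC = cN = cO = cS = cP = cF = cI = 0
--     cCl = cBr = cSi = 0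
--     prev = ''
--     for ch in s:
--         length += 1
--         digits += ch.isdigit()
--         paren += ch in ("(", ")")
--         dbl += ch == '='
--         tpl += ch == '#'
--         aro += ch in ("c", "n", "o", "s", "p")
--         cC += ch == 'C'
--         cN += ch == 'N'
--         cO += ch == 'O'
--         cS += ch == 'S'
--         cP += ch == 'P'
--         cF += ch == 'F'
--         cI += ch == 'I'
--         cCl += prev == 'C' and ch == 'l'
--         cBr += prev == 'B' and ch == 'r'
--         cSi += prev == 'S' and ch == 'i'
--         prev = ch
--     return {
--         "length": length,
--         "ring_digits": digits,
--         "branches": paren,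
--         "double_bonds": dbl,
--         "triple_bonds": tpl,
--         "aromatic_lower": aro,
--         "halogens": cCl + cBr + cF + cI,
--         "hetero_total": cN + cO + cS + cP + cF + cCl + cBr + cI + cSi,
--         "atom_C": cC,
--         "atom_N": cN,
--         "atom_O": cO,
--         "atom_S": cS,
--         "atom_P": cP,
--         "atom_F": cF,
--         "atom_Cl": cCl,
--         "atom_Br": cBr,
--         "atom_I": cI,
--         "atom_Si": cSi,
--     }
-- ===== Notes on version B (the rewrite author's own statement) =====
-- stated objective: alternative
-- what changed: B replaces A's ~15 independent scans of the string (str.count calls, two generator sums, a loop of str.count over COMMON_ATOMS) by ONE left-to-right pass with a one-character look-behind that maintains all counters at once; two-character atoms Cl/Br/Si are detected from the (prev, ch) pair.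
import Mathlib
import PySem

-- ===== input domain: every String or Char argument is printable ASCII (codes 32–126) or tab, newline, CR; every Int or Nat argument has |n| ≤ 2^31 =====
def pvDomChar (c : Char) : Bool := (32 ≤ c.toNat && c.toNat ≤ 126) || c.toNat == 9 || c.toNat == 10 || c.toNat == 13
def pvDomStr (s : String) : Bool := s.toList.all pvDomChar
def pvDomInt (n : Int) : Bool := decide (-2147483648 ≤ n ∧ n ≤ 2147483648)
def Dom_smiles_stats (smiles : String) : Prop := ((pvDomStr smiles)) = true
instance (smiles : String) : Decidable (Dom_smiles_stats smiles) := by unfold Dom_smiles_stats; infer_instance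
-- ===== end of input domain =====

-- B makes a single left-to-right pass with one-character look-behind instead of A's ~15 separate scans (objective: alternative decomposition, same results).

-- ===== PORT A =====
def pvCommonAtoms : List String := ["C", "N", "O", "S", "P", "F", "Cl", "Br", "I", "Si"]

def smiles_stats (smiles : String) : List (String × Int) :=
  let s := smiles
  let stats : PySem.Dict String Int := ⟨[
    ("length", (PySem.Str.len s : Int)),
    ("ring_digits", (s.toList.map (fun ch => if PySem.Chars.isdigit ch then (1 : Int) else 0)).sum),
    ("branches", (PySem.Str.count s "(" : Int) + (PySem.Str.count s ")" : Int)),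
    ("double_bonds", (PySem.Str.count s "=" : Int)),
    ("triple_bonds", (PySem.Str.count s "#" : Int)),
    ("aromatic_lower", (s.toList.map (fun ch => if PySem.Chars.isIn [ch] "cnosp".toList then (1 : Int) else 0)).sum),
    ("halogens", (PySem.Str.count s "Cl" : Int) + (PySem.Str.count s "Br" : Int) + (PySem.Str.count s "F" : Int) + (PySem.Str.count s "I" : Int)),
    ("hetero_total", 0)]⟩
  let r := pvCommonAtoms.foldl (fun (p : PySem.Dict String Int × Int) atom =>
      let count : Int := (PySem.Str.count s atom : Int)
      let stats' := p.1.insert ("atom_" ++ atom) count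
      (stats', if atom ≠ "C" then p.2 + count else p.2)) (stats, 0)
  ((r.1.insert "hetero_total" r.2)).items

-- ===== PORT B =====
structure PvSt where
  len : Int
  digits : Int
  paren : Int
  dbl : Int
  tpl : Int
  aro : Int
  cC : Int
  cN : Int
  cO : Int
  cS : Int
  cP : Int
  cF : Int
  cI : Int
  cCl : Int
  cBr : Int
  cSi : Int
  prev : Option Char   -- Python's prev string; '' (never equal to any char) is `none`
deriving Repr, DecidableEq

def pvStep (st : PvSt) (ch : Char) : PvSt :=
  { len := st.len + 1,
    digits := st.digits + (if PySem.Chars.isdigit ch then 1 else 0),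
    paren := st.paren + (if ch ∈ ['(', ')'] then 1 else 0),
    dbl := st.dbl + (if ch = '=' then 1 else 0),
    tpl := st.tpl + (if ch = '#' then 1 else 0),
    aro := st.aro + (if ch ∈ ['c', 'n', 'o', 's', 'p'] then 1 else 0),
    cC := st.cC + (if ch = 'C' then 1 else 0),
    cN := st.cN + (if ch = 'N' then 1 else 0),
    cO := st.cO + (if ch = 'O' then 1 else 0),
    cS := st.cS + (if ch = 'S' then 1 else 0),
    cP := st.cP + (if ch = 'P' then 1 else 0),
    cF := st.cF + (if ch = 'F' then 1 else 0),
    cI := st.cI + (if ch = 'I' then 1 else 0),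
    cCl := st.cCl + (if st.prev = some 'C' ∧ ch = 'l' then 1 else 0),
    cBr := st.cBr + (if st.prev = some 'B' ∧ ch = 'r' then 1 else 0),
    cSi := st.cSi + (if st.prev = some 'S' ∧ ch = 'i' then 1 else 0),
    prev := some ch }

def smiles_stats_alt (smiles : String) : List (String × Int) :=
  let s := smiles
  let st := s.toList.foldl pvStep ⟨0, 0, 0, 0, 0, 0, 0, 0, 0, 0, 0, 0, 0, 0, 0, 0, none⟩
  [("length", st.len),
   ("ring_digits", st.digits),
   ("branches", st.paren),
   ("double_bonds", st.dbl),
   ("triple_bonds", st.tpl),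
   ("aromatic_lower", st.aro),
   ("halogens", st.cCl + st.cBr + st.cF + st.cI),
   ("hetero_total", st.cN + st.cO + st.cS + st.cP + st.cF + st.cCl + st.cBr + st.cI + st.cSi),
   ("atom_C", st.cC),
   ("atom_N", st.cN),
   ("atom_O", st.cO),
   ("atom_S", st.cS),
   ("atom_P", st.cP),
   ("atom_F", st.cF),
   ("atom_Cl", st.cCl),
   ("atom_Br", st.cBr),
   ("atom_I", st.cI),
   ("atom_Si", st.cSi)]

-- ===== PRECONDITION & SPEC =====
def Spec_smiles_stats (smiles : String) (out : List (String × Int)) : Prop := out = smiles_stats_alt smiles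
instance (smiles : String) (out : List (String × Int)) : Decidable (Spec_smiles_stats smiles out) := by unfold Spec_smiles_stats; infer_instance

-- ===== CLAIM (what is proved, stated in full; the proofs are below) =====
def Claim_equal_smiles_stats : Prop := ∀ (smiles : String), Dom_smiles_stats smiles → Spec_smiles_stats smiles (smiles_stats smiles)

-- ===== LEMMAS AND PROOFS =====

-- adjacent-pair count: number of positions i with l[i] = a and l[i+1] = b
def pvPairCount (a b : Char) : List Char → Nat
  | x :: y :: t => (if x = a ∧ y = b then 1 else 0) + pvPairCount a b (y :: t)
  | _ => 0

-- look-behind pair count, as maintained by B's loop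
def pvPC (p : Option Char) (a b : Char) : List Char → Nat
  | [] => 0
  | x :: t => (if p = some a ∧ x = b then 1 else 0) + pvPC (some x) a b t

def pvLastD (p : Option Char) : List Char → Option Char
  | [] => p
  | x :: t => pvLastD (some x) t

lemma pvPC_some_eq (a b : Char) (t : List Char) : ∀ x, pvPC (some x) a b t = pvPairCount a b (x :: t) := by
  induction t with
  | nil => intro x; simp [pvPC, pvPairCount]
  | cons y t ih =>
      intro x
      simp only [pvPC, pvPairCount, ih y, Option.some.injEq]

lemma pvPC_none_eq (a b : Char) (l : List Char) : pvPC none a b l = pvPairCount a b l := by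
  cases l with
  | nil => rfl
  | cons x t => simp [pvPC, pvPC_some_eq]

lemma pvPairCount_cons_ne (a b y : Char) (t : List Char) (h : y ≠ a) :
    pvPairCount a b (y :: t) = pvPairCount a b t := by
  cases t with
  | nil => rfl
  | cons z t' => simp [pvPairCount, h]

lemma pvCountGo_nil (sub : List Char) (fuel acc : Nat) :
    PySem.Chars.count.go sub fuel [] acc = acc := by
  cases fuel <;> simp [PySem.Chars.count.go]

lemma pvCountGo_one (c : Char) : ∀ fuel (l : List Char) (acc : Nat), l.length ≤ fuel →
    PySem.Chars.count.go [c] fuel l acc = acc + l.count c := by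
  intro fuel
  induction fuel with
  | zero =>
      intro l acc h
      have hl : l = [] := List.eq_nil_of_length_eq_zero (Nat.le_zero.1 h)
      subst hl; simp [pvCountGo_nil]
  | succ fuel ih =>
      intro l acc h
      cases l with
      | nil => simp [PySem.Chars.count.go]
      | cons x t =>
          by_cases hx : c = x
          · subst hx
            simp [PySem.Chars.count.go, List.isPrefixOf, ih t (acc + 1) (by simpa using h)]
            omega
          · simp [PySem.Chars.count.go, List.isPrefixOf, hx, ih t acc (by simpa using h), Ne.symm hx]

lemma pvCountGo_two (a b : Char) (hab : a ≠ b) : ∀ fuel (l : List Char) (acc : Nat), l.length ≤ fuel →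
    PySem.Chars.count.go [a, b] fuel l acc = acc + pvPairCount a b l := by
  intro fuel
  induction fuel with
  | zero =>
      intro l acc h
      have hl : l = [] := List.eq_nil_of_length_eq_zero (Nat.le_zero.1 h)
      subst hl; simp [pvCountGo_nil, pvPairCount]
  | succ fuel ih =>
      intro l acc h
      cases l with
      | nil => simp [pvCountGo_nil, pvPairCount]
      | cons x t =>
          cases t with
          | nil =>
              simp [PySem.Chars.count.go, List.isPrefixOf, pvPairCount, pvCountGo_nil]
          | cons y t' =>
              have hlen : t'.length ≤ fuel := by simp at h; omega
              by_cases hxy : x = a ∧ y = b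
              · obtain ⟨hx, hy⟩ := hxy
                subst hx; subst hy
                simp only [PySem.Chars.count.go, List.isPrefixOf, beq_self_eq_true,
                  Bool.true_and, Bool.and_true, List.isPrefixOf_nil_left, if_true,
                  List.length_cons, List.length_nil, List.drop_succ_cons, List.drop_zero]
                rw [ih t' (acc + 1) hlen, pvPairCount,
                  pvPairCount_cons_ne x y y t' (Ne.symm hab)]
                simp; omega
              · have hpre : ([a, b] : List Char).isPrefixOf (x :: y :: t') = false := by
                  by_contra hc
                  simp only [Bool.not_eq_false] at hc
                  simp [List.isPrefixOf] at hc
                  exact hxy ⟨hc.1.symm, hc.2.symm⟩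
                simp only [PySem.Chars.count.go, hpre, Bool.false_eq_true, if_false]
                rw [ih (y :: t') acc (by simp at h ⊢; omega)]
                simp [pvPairCount, hxy]

lemma pvCount_one (s : List Char) (c : Char) : PySem.Chars.count s [c] = s.count c := by
  simp [PySem.Chars.count, pvCountGo_one c s.length s 0 le_rfl]

lemma pvCount_two (s : List Char) (a b : Char) (hab : a ≠ b) :
    PySem.Chars.count s [a, b] = pvPairCount a b s := by
  simp [PySem.Chars.count, pvCountGo_two a b hab s.length s 0 le_rfl]

lemma pvIsIn_singleton (c : Char) (cs : List Char) :
    PySem.Chars.isIn [c] cs = cs.contains c := by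
  by_cases h : c ∈ cs
  · have hin : ([c] : List Char) <:+: cs := by
      obtain ⟨l1, l2, rfl⟩ := List.append_of_mem h
      exact ⟨l1, l2, by simp⟩
    rw [(PySem.Chars.isIn_iff_infix [c] cs).2 hin]
    simp [h]
  · have hni : ¬ (([c] : List Char) <:+: cs) := fun hc => h (hc.subset (by simp))
    rw [(PySem.Chars.isIn_eq_false_iff [c] cs).2 hni]
    simp [h]

lemma pvFoldB (l : List Char) : ∀ st : PvSt, l.foldl pvStep st =
    ⟨st.len + l.length,
     st.digits + (l.countP (fun c => PySem.Chars.isdigit c) : Int),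
     st.paren + (l.countP (fun c => c ∈ ['(', ')']) : Int),
     st.dbl + (l.count '=' : Int),
     st.tpl + (l.count '#' : Int),
     st.aro + (l.countP (fun c => c ∈ ['c', 'n', 'o', 's', 'p']) : Int),
     st.cC + (l.count 'C' : Int),
     st.cN + (l.count 'N' : Int),
     st.cO + (l.count 'O' : Int),
     st.cS + (l.count 'S' : Int),
     st.cP + (l.count 'P' : Int),
     st.cF + (l.count 'F' : Int),
     st.cI + (l.count 'I' : Int),
     st.cCl + (pvPC st.prev 'C' 'l' l : Int),
     st.cBr + (pvPC st.prev 'B' 'r' l : Int),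
     st.cSi + (pvPC st.prev 'S' 'i' l : Int),
     pvLastD st.prev l⟩ := by
  induction l with
  | nil => intro st; cases st; simp [pvPC, pvLastD]
  | cons x t ih =>
      intro st
      rw [List.foldl_cons, ih (pvStep st x)]
      simp only [pvStep]
      simp only [pvPC, pvLastD, List.countP_cons, List.count_cons, List.length_cons]
      simp only [PvSt.mk.injEq]
      and_intros <;> first
        | rfl
        | trivial
        | (push_cast; omega)
        | (split_ifs <;> push_cast <;> first | omega | simp_all)

lemma pvSum_ite_eq_countP (l : List Char) (p : Char → Bool) :
    (l.map (fun ch => if p ch then (1 : Int) else 0)).sum = (l.countP p : Int) := by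
  induction l with
  | nil => simp
  | cons x t ih =>
      simp only [List.map_cons, List.sum_cons, ih, List.countP_cons]
      split_ifs with h <;> simp [h] <;> omega

lemma pvStrCount_one (s : String) (c : Char) (sub : String) (h : sub.toList = [c]) :
    PySem.Str.count s sub = s.toList.count c := by
  simp [PySem.Str.count, h, pvCount_one]

lemma pvStrCount_two (s : String) (a b : Char) (sub : String) (h : sub.toList = [a, b])
    (hab : a ≠ b) : PySem.Str.count s sub = pvPairCount a b s.toList := by
  simp [PySem.Str.count, h, pvCount_two _ _ _ hab]

lemma pvCountP_two (a b : Char) (hab : a ≠ b) (l : List Char) :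
    l.countP (fun c => decide (c = a) || decide (c = b)) = l.count a + l.count b := by
  induction l with
  | nil => simp
  | cons x t ih =>
      simp only [List.countP_cons, List.count_cons, ih]
      by_cases hx : x = a
      · subst hx; simp [hab]; omega
      · by_cases hy : x = b
        · subst hy; simp [hx]; omega
        · simp [hx, hy, Ne.symm hx]

lemma pvAroEq (l : List Char) :
    l.countP (['c', 'n', 'o', 's', 'p'].contains ·) =
      l.countP (fun c => decide (c = 'c') ||
        (decide (c = 'n') || (decide (c = 'o') || (decide (c = 's') || decide (c = 'p'))))) := by
  apply List.countP_congr
  intro x _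
  simp [List.contains_eq_mem]

lemma pvInsert_new (l : List (String × Int)) (k : String) (v : Int)
    (h : (PySem.Dict.mk l).contains k = false) :
    (PySem.Dict.mk l).insert k v = ⟨l ++ [(k, v)]⟩ := by
  simp [PySem.Dict.insert, h]

set_option maxHeartbeats 1000000 in
lemma pvDictEval (a1 a2 a3 a4 a5 a6 a7 : Int) (cnt : String → Int) :
    ((pvCommonAtoms.foldl (fun (p : PySem.Dict String Int × Int) atom =>
        (p.1.insert ("atom_" ++ atom) (cnt atom), if atom ≠ "C" then p.2 + cnt atom else p.2))
        (⟨[("length", a1), ("ring_digits", a2), ("branches", a3), ("double_bonds", a4),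
           ("triple_bonds", a5), ("aromatic_lower", a6), ("halogens", a7), ("hetero_total", 0)]⟩, 0)).1.insert
      "hetero_total"
      (pvCommonAtoms.foldl (fun (p : PySem.Dict String Int × Int) atom =>
        (p.1.insert ("atom_" ++ atom) (cnt atom), if atom ≠ "C" then p.2 + cnt atom else p.2))
        (⟨[("length", a1), ("ring_digits", a2), ("branches", a3), ("double_bonds", a4),
           ("triple_bonds", a5), ("aromatic_lower", a6), ("halogens", a7), ("hetero_total", 0)]⟩, 0)).2).items
    = [("length", a1), ("ring_digits", a2), ("branches", a3), ("double_bonds", a4),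
       ("triple_bonds", a5), ("aromatic_lower", a6), ("halogens", a7),
       ("hetero_total", cnt "N" + cnt "O" + cnt "S" + cnt "P" + cnt "F" + cnt "Cl" + cnt "Br" + cnt "I" + cnt "Si"),
       ("atom_C", cnt "C"), ("atom_N", cnt "N"), ("atom_O", cnt "O"), ("atom_S", cnt "S"),
       ("atom_P", cnt "P"), ("atom_F", cnt "F"), ("atom_Cl", cnt "Cl"), ("atom_Br", cnt "Br"),
       ("atom_I", cnt "I"), ("atom_Si", cnt "Si")] := by
  simp only [pvCommonAtoms, List.foldl_cons, List.foldl_nil]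
  simp [pvInsert_new, PySem.Dict.contains]
  simp [PySem.Dict.insert, PySem.Dict.contains]

-- ===== VERDICT (by name: the statement is the Claim_ definition above) =====
set_option maxHeartbeats 1000000 in
theorem smiles_stats_spec : Claim_equal_smiles_stats := by
  intro s _hdom
  show smiles_stats s = smiles_stats_alt s
  simp only [smiles_stats, smiles_stats_alt]
  rw [pvDictEval, pvFoldB]
  simp only [PySem.Str.len, pvSum_ite_eq_countP, pvIsIn_singleton, pvPC_none_eq,
    pvStrCount_one s '(' "(" rfl, pvStrCount_one s ')' ")" rfl,
    pvStrCount_one s '=' "=" rfl, pvStrCount_one s '#' "#" rfl,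
    pvStrCount_one s 'C' "C" rfl, pvStrCount_one s 'N' "N" rfl,
    pvStrCount_one s 'O' "O" rfl, pvStrCount_one s 'S' "S" rfl,
    pvStrCount_one s 'P' "P" rfl, pvStrCount_one s 'F' "F" rfl,
    pvStrCount_one s 'I' "I" rfl,
    pvStrCount_two s 'C' 'l' "Cl" rfl (by decide),
    pvStrCount_two s 'B' 'r' "Br" rfl (by decide),
    pvStrCount_two s 'S' 'i' "Si" rfl (by decide)]
  simp [show "cnosp".toList = ['c', 'n', 'o', 's', 'p'] from rfl]
  constructor
  · rw [pvCountP_two '(' ')' (by decide)]; push_cast; omega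
  · exact pvAroEq s.toList
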